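-- pv_equiv track=rewrite | github.com/SokolovG/Merkly | src/application/agent/prompts.py | build_writing_review_prompt
-- ===== SOURCE A (Python) =====
-- LANG_NAMES: dict[str, str] = {
--     "de": "German",
--     "en": "English",
--     "es": "Spanish",
--     "fr": "French",
--     "it": "Italian",
--     "pt": "Portuguese",
--     "ru": "Russian",
--     "ar": "Arabic",
--     "zh": "Chinese",
-- }
--
-- def lang_name(code: str) -> str:
--     # If it's a known code, return the name. Otherwise use as-is (user typed full name).
--     return LANG_NAMES.get(code.lower(), code)
--
-- def build_writing_review_prompt(
--     writing_task: str,
--     user_writing: str,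
--     level: str,
--     native_lang: str,
--     target_lang: str,
--     mode: str = "sentences",
-- ) -> str:
--     name = lang_name(target_lang)
--     native_name = lang_name(native_lang)
--     base = (
--         f"Review this {name} writing exercise. Student level: {level}. Native: {native_name}.\n\n"
--         f"Task given: {writing_task}\n\n"
--         f"Student wrote:\n{user_writing}\n\n"
--     )
--
--     if mode == "sentences":
--         return base + (
--             f"Instructions:\n"
--             f"1. Correct all grammar and vocabulary mistakes. Show each correction in {name} and {native_name}.\n"
--             f"2. Highlight 1–2 words/phrases that are especially natural or worth remembering.\n"
--             f"3. One sentence of encouragement.\n"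
--             f"4. Create flashcards for mistakes + highlighted vocabulary. Max 5 cards.\n"
--             f"   Only create cards if the student made a genuine attempt.\n"
--         )
--
--     if mode == "grammar":
--         return base + (
--             f"Instructions:\n"
--             f"1. Check specifically whether the target grammar structure was used correctly. "
--             f"Point out every grammatical error in the structure with a correction in {name} and {native_name}.\n"
--             f"2. Also correct any other grammar or vocabulary mistakes.\n"
--             f"3. Show 1 example of the same structure used beautifully.\n"
--             f"4. One sentence of encouragement.\n"
--             f"5. Create flashcards for grammar mistakes (use the corrected form as the card). Max 5 cards.\n"
--             f"   Only create cards if the student made a genuine attempt.\n"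
--         )
--
--     if mode == "article":
--         return base + (
--             f"Instructions (Essay exam preparation feedback):\n"
--             f"1. Structure: Does the text have a clear introduction, body, and conclusion? Comment on this.\n"
--             f"2. Content: Did the student address the required points from the task? What's missing or shallow?\n"
--             f"3. Language: Correct all grammar mistakes. Note vocabulary that is too simple for {level} "
--             f"and suggest more formal/precise alternatives.\n"
--             f"4. Cohesion: Comment on connectors, transitions, and register (formal/informal).\n"
--             f"5. Overall grade estimate: A (sehr gut) / B (gut) / C (befriedigend) / D (needs work), with one sentence why.\n"
--             f"6. Create flashcards for: vocabulary gaps, formal alternatives the student should know. Max 5 cards.\n"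
--             f"   Only create cards if the student made a genuine attempt.\n"
--             f"Write feedback in {name}, show corrections also in {native_name}.\n"
--         )
--
--     return build_writing_review_prompt(
--         writing_task, user_writing, level, native_lang, target_lang, mode="sentences"
--     )
-- ===== SOURCE B (Python) =====
-- LANG_NAMES: dict[str, str] = {
--     "de": "German",
--     "en": "English",
--     "es": "Spanish",
--     "fr": "French",
--     "it": "Italian",
--     "pt": "Portuguese",
--     "ru": "Russian",
--     "ar": "Arabic",
--     "zh": "Chinese",
-- }
--
-- def lang_name(code: str) -> str:
--     return LANG_NAMES.get(code.lower(), code)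
--
-- # Templates as token lists: ("lit", text) is literal text, ("field", key) is a
-- # placeholder resolved against the environment at render time.
-- _BASE_TOKENS = [
--     ("lit", "Review this "), ("field", "name"),
--     ("lit", " writing exercise. Student level: "), ("field", "level"),
--     ("lit", ". Native: "), ("field", "native_name"),
--     ("lit", ".\n\nTask given: "), ("field", "task"),
--     ("lit", "\n\nStudent wrote:\n"), ("field", "writing"),
--     ("lit", "\n\n"),
-- ]
--
-- _MODE_TOKENS = {
--     "sentences": [
--         ("lit", "Instructions:\n1. Correct all grammar and vocabulary mistakes. Show each correction in "),
--         ("field", "name"), ("lit", " and "), ("field", "native_name"),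
--         ("lit", ".\n2. Highlight 1\u20132 words/phrases that are especially natural or worth remembering.\n3. One sentence of encouragement.\n4. Create flashcards for mistakes + highlighted vocabulary. Max 5 cards.\n   Only create cards if the student made a genuine attempt.\n"),
--     ],
--     "grammar": [
--         ("lit", "Instructions:\n1. Check specifically whether the target grammar structure was used correctly. Point out every grammatical error in the structure with a correction in "),
--         ("field", "name"), ("lit", " and "), ("field", "native_name"),
--         ("lit", ".\n2. Also correct any other grammar or vocabulary mistakes.\n3. Show 1 example of the same structure used beautifully.\n4. One sentence of encouragement.\n5. Create flashcards for grammar mistakes (use the corrected form as the card). Max 5 cards.\n   Only create cards if the student made a genuine attempt.\n"),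
--     ],
--     "article": [
--         ("lit", "Instructions (Essay exam preparation feedback):\n1. Structure: Does the text have a clear introduction, body, and conclusion? Comment on this.\n2. Content: Did the student address the required points from the task? What's missing or shallow?\n3. Language: Correct all grammar mistakes. Note vocabulary that is too simple for "),
--         ("field", "level"),
--         ("lit", " and suggest more formal/precise alternatives.\n4. Cohesion: Comment on connectors, transitions, and register (formal/informal).\n5. Overall grade estimate: A (sehr gut) / B (gut) / C (befriedigend) / D (needs work), with one sentence why.\n6. Create flashcards for: vocabulary gaps, formal alternatives the student should know. Max 5 cards.\n   Only create cards if the student made a genuine attempt.\nWrite feedback in "),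
--         ("field", "name"), ("lit", ", show corrections also in "), ("field", "native_name"),
--         ("lit", ".\n"),
--     ],
-- }
--
-- def _render(tokens, env):
--     parts = []
--     for kind, val in tokens:
--         parts.append(val if kind == "lit" else env[val])
--     return "".join(parts)
--
-- def build_writing_review_prompt(
--     writing_task: str,
--     user_writing: str,
--     level: str,
--     native_lang: str,
--     target_lang: str,
--     mode: str = "sentences",
-- ) -> str:
--     env = {
--         "name": lang_name(target_lang),
--         "native_name": lang_name(native_lang),
--         "level": level,
--         "task": writing_task,
--         "writing": user_writing,
--     }
--     tokens = _BASE_TOKENS + _MODE_TOKENS.get(mode, _MODE_TOKENS["sentences"])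
--     return _render(tokens, env)
-- ===== Notes on version B (the rewrite author's own statement) =====
-- stated objective: alternative
-- what changed: Replaced inline f-string branch construction (with a recursive default call) by a data-driven template engine: constant token lists (literal/placeholder) per mode, an environment of field values, and a single render pass that joins the resolved tokens.
import Mathlib
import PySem

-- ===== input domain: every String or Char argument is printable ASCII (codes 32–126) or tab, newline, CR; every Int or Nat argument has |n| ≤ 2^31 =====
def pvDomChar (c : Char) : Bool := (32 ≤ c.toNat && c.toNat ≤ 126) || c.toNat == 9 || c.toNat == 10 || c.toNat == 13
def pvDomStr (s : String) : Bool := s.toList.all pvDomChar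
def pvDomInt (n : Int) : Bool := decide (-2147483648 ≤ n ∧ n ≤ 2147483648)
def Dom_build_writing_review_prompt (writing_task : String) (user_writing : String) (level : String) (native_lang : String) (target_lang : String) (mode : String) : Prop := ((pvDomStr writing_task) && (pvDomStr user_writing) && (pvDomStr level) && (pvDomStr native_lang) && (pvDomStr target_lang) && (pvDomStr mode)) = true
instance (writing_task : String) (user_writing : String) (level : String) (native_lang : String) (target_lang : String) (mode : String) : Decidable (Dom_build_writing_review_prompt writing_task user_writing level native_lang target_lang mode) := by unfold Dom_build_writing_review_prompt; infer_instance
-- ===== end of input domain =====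

-- B replaces A's inline f-string branches (whose default branch recursively re-calls the
-- function with mode="sentences") by a data-driven template engine: constant token lists
-- (literal / placeholder) per mode and one render pass over an environment; objective:
-- alternative decomposition, same cost.

-- ===== PORT A =====
def pvLangNames : PySem.Dict String String := PySem.Dict.ofList [("de", "German"), ("en", "English"), ("es", "Spanish"), ("fr", "French"), ("it", "Italian"), ("pt", "Portuguese"), ("ru", "Russian"), ("ar", "Arabic"), ("zh", "Chinese")]

def lang_name (code : String) : String := pvLangNames.getD (PySem.Str.lower code) code

def build_writing_review_prompt (writing_task : String) (user_writing : String) (level : String) (native_lang : String) (target_lang : String) (mode : String) : String :=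
  let name := lang_name target_lang
  let native_name := lang_name native_lang
  let base := "Review this " ++ name ++ " writing exercise. Student level: " ++ level ++ ". Native: " ++ native_name ++ ".\n\nTask given: " ++ writing_task ++ "\n\nStudent wrote:\n" ++ user_writing ++ "\n\n"
  if _h1 : mode = "sentences" then
    base ++ "Instructions:\n1. Correct all grammar and vocabulary mistakes. Show each correction in " ++ name ++ " and " ++ native_name ++ ".\n2. Highlight 1–2 words/phrases that are especially natural or worth remembering.\n3. One sentence of encouragement.\n4. Create flashcards for mistakes + highlighted vocabulary. Max 5 cards.\n   Only create cards if the student made a genuine attempt.\n"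
  else if _h2 : mode = "grammar" then
    base ++ "Instructions:\n1. Check specifically whether the target grammar structure was used correctly. Point out every grammatical error in the structure with a correction in " ++ name ++ " and " ++ native_name ++ ".\n2. Also correct any other grammar or vocabulary mistakes.\n3. Show 1 example of the same structure used beautifully.\n4. One sentence of encouragement.\n5. Create flashcards for grammar mistakes (use the corrected form as the card). Max 5 cards.\n   Only create cards if the student made a genuine attempt.\n"
  else if _h3 : mode = "article" then
    base ++ "Instructions (Essay exam preparation feedback):\n1. Structure: Does the text have a clear introduction, body, and conclusion? Comment on this.\n2. Content: Did the student address the required points from the task? What's missing or shallow?\n3. Language: Correct all grammar mistakes. Note vocabulary that is too simple for " ++ level ++ " and suggest more formal/precise alternatives.\n4. Cohesion: Comment on connectors, transitions, and register (formal/informal).\n5. Overall grade estimate: A (sehr gut) / B (gut) / C (befriedigend) / D (needs work), with one sentence why.\n6. Create flashcards for: vocabulary gaps, formal alternatives the student should know. Max 5 cards.\n   Only create cards if the student made a genuine attempt.\nWrite feedback in " ++ name ++ ", show corrections also in " ++ native_name ++ ".\n"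
  else
    build_writing_review_prompt writing_task user_writing level native_lang target_lang "sentences"
termination_by (if mode = "sentences" then 0 else 1)
decreasing_by simp [*]

-- ===== PORT B =====
def pvLangNamesB : PySem.Dict String String := PySem.Dict.ofList [("de", "German"), ("en", "English"), ("es", "Spanish"), ("fr", "French"), ("it", "Italian"), ("pt", "Portuguese"), ("ru", "Russian"), ("ar", "Arabic"), ("zh", "Chinese")]

def lang_name_b (code : String) : String := pvLangNamesB.getD (PySem.Str.lower code) code

-- token (true, s) = literal text s; token (false, k) = placeholder for env key k
def pvBaseTokens : List (Bool × String) :=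
  [(true, "Review this "), (false, "name"),
   (true, " writing exercise. Student level: "), (false, "level"),
   (true, ". Native: "), (false, "native_name"),
   (true, ".\n\nTask given: "), (false, "task"),
   (true, "\n\nStudent wrote:\n"), (false, "writing"),
   (true, "\n\n")]

def pvModeTokens : PySem.Dict String (List (Bool × String)) := PySem.Dict.ofList
  [("sentences",
    [(true, "Instructions:\n1. Correct all grammar and vocabulary mistakes. Show each correction in "),
     (false, "name"), (true, " and "), (false, "native_name"),
     (true, ".\n2. Highlight 1–2 words/phrases that are especially natural or worth remembering.\n3. One sentence of encouragement.\n4. Create flashcards for mistakes + highlighted vocabulary. Max 5 cards.\n   Only create cards if the student made a genuine attempt.\n")]),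
   ("grammar",
    [(true, "Instructions:\n1. Check specifically whether the target grammar structure was used correctly. Point out every grammatical error in the structure with a correction in "),
     (false, "name"), (true, " and "), (false, "native_name"),
     (true, ".\n2. Also correct any other grammar or vocabulary mistakes.\n3. Show 1 example of the same structure used beautifully.\n4. One sentence of encouragement.\n5. Create flashcards for grammar mistakes (use the corrected form as the card). Max 5 cards.\n   Only create cards if the student made a genuine attempt.\n")]),
   ("article",
    [(true, "Instructions (Essay exam preparation feedback):\n1. Structure: Does the text have a clear introduction, body, and conclusion? Comment on this.\n2. Content: Did the student address the required points from the task? What's missing or shallow?\n3. Language: Correct all grammar mistakes. Note vocabulary that is too simple for "),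
     (false, "level"),
     (true, " and suggest more formal/precise alternatives.\n4. Cohesion: Comment on connectors, transitions, and register (formal/informal).\n5. Overall grade estimate: A (sehr gut) / B (gut) / C (befriedigend) / D (needs work), with one sentence why.\n6. Create flashcards for: vocabulary gaps, formal alternatives the student should know. Max 5 cards.\n   Only create cards if the student made a genuine attempt.\nWrite feedback in "),
     (false, "name"), (true, ", show corrections also in "), (false, "native_name"),
     (true, ".\n")])]

-- _render: the loop appending each resolved token then ''.join, as structural recursion;
-- env[val] is exact here because every placeholder key is present in env (getD "" never fires)
def pvRender (tokens : List (Bool × String)) (env : PySem.Dict String String) : String :=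
  match tokens with
  | [] => ""
  | (kind, val) :: rest => (if kind then val else env.getD val "") ++ pvRender rest env

def build_writing_review_prompt_alt (writing_task : String) (user_writing : String) (level : String) (native_lang : String) (target_lang : String) (mode : String) : String :=
  let env : PySem.Dict String String := PySem.Dict.ofList
    [("name", lang_name_b target_lang), ("native_name", lang_name_b native_lang),
     ("level", level), ("task", writing_task), ("writing", user_writing)]
  let tokens := pvBaseTokens ++ (pvModeTokens.getD mode (pvModeTokens.getD "sentences" []))
  pvRender tokens env

-- ===== PRECONDITION & SPEC =====
def Spec_build_writing_review_prompt (writing_task : String) (user_writing : String) (level : String) (native_lang : String) (target_lang : String) (mode : String) (out : String) : Prop := out = build_writing_review_prompt_alt writing_task user_writing level native_lang target_lang mode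
instance (writing_task : String) (user_writing : String) (level : String) (native_lang : String) (target_lang : String) (mode : String) (out : String) : Decidable (Spec_build_writing_review_prompt writing_task user_writing level native_lang target_lang mode out) := by unfold Spec_build_writing_review_prompt; infer_instance

-- ===== CLAIM =====
def Claim_equal_build_writing_review_prompt : Prop := ∀ (writing_task : String) (user_writing : String) (level : String) (native_lang : String) (target_lang : String) (mode : String), Dom_build_writing_review_prompt writing_task user_writing level native_lang target_lang mode → Spec_build_writing_review_prompt writing_task user_writing level native_lang target_lang mode (build_writing_review_prompt writing_task user_writing level native_lang target_lang mode)

-- ===== LEMMAS AND PROOFS =====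
theorem pv_lit_merge (a b c y : String) (h : a ++ b = c) : c ++ y = a ++ (b ++ y) := by rw [← String.append_assoc, h]

theorem pv_langs_agree : pvLangNamesB = pvLangNames := rfl

set_option maxRecDepth 8192 in
theorem pv_eq_all_modes (writing_task user_writing level native_lang target_lang mode : String) :
    build_writing_review_prompt writing_task user_writing level native_lang target_lang mode
      = build_writing_review_prompt_alt writing_task user_writing level native_lang target_lang mode := by
  by_cases h1 : mode = "sentences"
  · subst h1
    simp [build_writing_review_prompt, build_writing_review_prompt_alt, lang_name, lang_name_b,
      pv_langs_agree, pvRender, pvBaseTokens, pvModeTokens, PySem.Dict.getD, PySem.Dict.ofList,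
      PySem.Dict.update, PySem.Dict.get?_insert, List.foldl, String.append_assoc]
    exact pv_lit_merge _ _ _ _ rfl
  · by_cases h2 : mode = "grammar"
    · subst h2
      simp [build_writing_review_prompt, build_writing_review_prompt_alt, lang_name, lang_name_b,
        pv_langs_agree, pvRender, pvBaseTokens, pvModeTokens, PySem.Dict.getD, PySem.Dict.ofList,
        PySem.Dict.update, PySem.Dict.get?_insert, List.foldl, String.append_assoc]
      exact pv_lit_merge _ _ _ _ rfl
    · by_cases h3 : mode = "article"
      · subst h3
        simp [build_writing_review_prompt, build_writing_review_prompt_alt, lang_name, lang_name_b,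
          pv_langs_agree, pvRender, pvBaseTokens, pvModeTokens, PySem.Dict.getD, PySem.Dict.ofList,
          PySem.Dict.update, PySem.Dict.get?_insert, List.foldl, String.append_assoc]
        exact pv_lit_merge _ _ _ _ rfl
      · rw [build_writing_review_prompt]
        simp only [h1, h2, h3, dif_neg, not_false_iff]
        simp [build_writing_review_prompt, build_writing_review_prompt_alt, lang_name, lang_name_b,
          pv_langs_agree, pvRender, pvBaseTokens, pvModeTokens, PySem.Dict.getD, PySem.Dict.ofList,
          PySem.Dict.update, PySem.Dict.get?_insert, PySem.Dict.get?_empty, List.foldl, h1, h2, h3,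
          String.append_assoc]
        exact pv_lit_merge _ _ _ _ rfl

-- ===== VERDICT =====
theorem build_writing_review_prompt_spec : Claim_equal_build_writing_review_prompt := by
  intro writing_task user_writing level native_lang target_lang mode _
  exact pv_eq_all_modes writing_task user_writing level native_lang target_lang mode
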